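-- pv_equiv track=rewrite | github.com/juanafres/MeLi-Challenge | mutant.py | es_vertical
-- ===== SOURCE A (Python) =====
-- COMPA = 'AAAA'
--
-- COMPT = 'TTTT'
--
-- COMPC = 'CCCC'
--
-- COMPG = 'GGGG'
--
-- def es_vertical(dna):
--     row = ''
--     for j in range(len(dna)):
--         for x in range(len(dna)):
--             row += dna[x][j]
--         if row.find(COMPA) != -1 or row.find(COMPT) != -1 or row.find(COMPC) != -1 or row.find(COMPG) != -1:
--             return True
--         row = ''
--
--     return False
-- ===== SOURCE B (Python) =====
-- def es_vertical(dna):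
--     n = len(dna)
--     for j in range(n):
--         prev = None
--         count = 0
--         for x in range(n):
--             c = dna[x][j]
--             if prev == c:
--                 count += 1
--             else:
--                 prev = c
--                 count = 1
--             if count >= 4 and c in 'ATCG':
--                 return True
--     return False
-- ===== Notes on version B (the rewrite author's own statement) =====
-- stated objective: alternative
-- what changed: Replaces per-column string concatenation plus four str.find substring searches with a single incremental run-length scan over each column (prev letter + counter), returning as soon as a run of 4 A/T/C/G letters is seen.
import Mathlib
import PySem

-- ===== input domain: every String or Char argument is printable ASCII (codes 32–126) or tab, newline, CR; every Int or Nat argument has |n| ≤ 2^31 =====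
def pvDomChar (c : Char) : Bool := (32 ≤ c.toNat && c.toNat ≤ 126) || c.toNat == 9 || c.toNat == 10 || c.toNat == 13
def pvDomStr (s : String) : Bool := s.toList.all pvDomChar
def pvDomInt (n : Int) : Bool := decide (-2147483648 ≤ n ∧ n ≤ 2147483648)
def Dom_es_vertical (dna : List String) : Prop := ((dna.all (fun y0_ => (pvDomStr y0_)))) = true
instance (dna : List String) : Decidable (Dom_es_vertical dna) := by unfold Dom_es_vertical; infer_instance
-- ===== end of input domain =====

-- B replaces A's per-column string concatenation + four str.find searches by an
-- incremental run-length scan of each column (alternative decomposition, same cost).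


-- ===== PORT A =====
-- dna[x][j]; inside Pre_ every indexing A's Python actually performs is in range,
-- so the defaults are never the value A's Python would have raised on
def pvAt (dna : List String) (x j : Nat) : Char :=
  (PySem.Str.pyGet? (PySem.List.pyGetD dna (x : Int) "") (j : Int)).getD ' '

def pvCOMPA : List Char := ['A', 'A', 'A', 'A']
def pvCOMPT : List Char := ['T', 'T', 'T', 'T']
def pvCOMPC : List Char := ['C', 'C', 'C', 'C']
def pvCOMPG : List Char := ['G', 'G', 'G', 'G']

def es_vertical (dna : List String) : Bool :=
  (List.range dna.length).any fun j =>
    let row : List Char :=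
      (List.range dna.length).foldl (fun r x => r ++ [pvAt dna x j]) []
    (PySem.Chars.find row pvCOMPA != -1) || (PySem.Chars.find row pvCOMPT != -1) ||
      (PySem.Chars.find row pvCOMPC != -1) || (PySem.Chars.find row pvCOMPG != -1)

-- ===== PORT B =====
def pvDNA : List Char := ['A', 'T', 'C', 'G']

-- the inner row loop of Source B, carrying (prev, count)
def pvScan (dna : List String) (j : Nat) : List Nat → Option Char → Nat → Bool
  | [], _, _ => false
  | x :: xs, prev, count =>
    let c := pvAt dna x j
    let count' := if prev == some c then count + 1 else 1
    if 4 ≤ count' && pvDNA.contains c then true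
    else pvScan dna j xs (some c) count'

def es_vertical_alt (dna : List String) : Bool :=
  (List.range dna.length).any fun j =>
    pvScan dna j (List.range dna.length) none 0

-- ===== PRECONDITION & SPEC =====
-- 'column j contains a vertical run of 4 equal DNA letters' (a property of the input grid)
def pvGood (l : List Char) : Prop :=
  ['A', 'A', 'A', 'A'] <:+: l ∨ ['T', 'T', 'T', 'T'] <:+: l ∨
    ['C', 'C', 'C', 'C'] <:+: l ∨ ['G', 'G', 'G', 'G'] <:+: l

-- Pre_ excludes exactly the inputs on which A raises IndexError: some row is shorter
-- than len(dna) and no column readable in every row already contains a 4-run, so A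
-- reaches the short row before returning; on every input where A returns, Pre_ holds.
def Pre_es_vertical (dna : List String) : Prop :=
  (∀ s ∈ dna, dna.length ≤ s.toList.length) ∨
  (∃ j, j < dna.length ∧ (∀ s ∈ dna, j < s.toList.length) ∧
    pvGood (dna.map (fun s => s.toList.getD j ' ')))
instance (dna : List String) : Decidable (Pre_es_vertical dna) := by unfold Pre_es_vertical pvGood; infer_instance
def pvWitness_es_vertical : List String := ["AT", "AC"]
def Spec_es_vertical (dna : List String) (out : Bool) : Prop := out = es_vertical_alt dna
instance (dna : List String) (out : Bool) : Decidable (Spec_es_vertical dna out) := by unfold Spec_es_vertical; infer_instance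

-- ===== CLAIM (what is proved, stated in full; the proofs are below) =====
def Claim_equal_es_vertical : Prop := ∀ (dna : List String), Dom_es_vertical dna → Pre_es_vertical dna → Spec_es_vertical dna (es_vertical dna)

-- ===== LEMMAS AND PROOFS =====

-- pvScan specialised to the list of characters it reads
def pvScanChars : List Char → Option Char → Nat → Bool
  | [], _, _ => false
  | c :: l, prev, count =>
    let count' := if prev == some c then count + 1 else 1
    if 4 ≤ count' && pvDNA.contains c then true
    else pvScanChars l (some c) count'

theorem pvScan_eq_scanChars (dna : List String) (j : Nat) :
    ∀ (xs : List Nat) (prev : Option Char) (count : Nat),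
      pvScan dna j xs prev count = pvScanChars (xs.map (fun x => pvAt dna x j)) prev count := by
  intro xs
  induction xs with
  | nil => intro _ _; rfl
  | cons x xs ih => intro prev count; simp [pvScan, pvScanChars, ih]

theorem pvReplicate_prefix_iff (m : Nat) (p : Char) (l : List Char) :
    List.replicate m p <+: l ↔ m ≤ (l.takeWhile (fun c => c == p)).length := by
  induction l generalizing m with
  | nil => cases m <;> simp [List.replicate]
  | cons c l ih =>
    cases m with
    | zero => simp
    | succ m =>
      by_cases hc : c = p
      · subst hc
        simp only [List.replicate, List.cons_prefix_cons, List.takeWhile]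
        simp [ih]
      · simp only [List.replicate, List.cons_prefix_cons, List.takeWhile_cons]
        simp [hc, Ne.symm hc]

theorem pvGood_nil : ¬ pvGood [] := by
  intro h
  rcases h with h | h | h | h <;> simp at h

theorem pvRun_head {x c : Char} {l : List Char}
    (h : List.replicate 4 x <+: c :: l) :
    c = x ∧ 4 ≤ 1 + (l.takeWhile (fun d => d == c)).length := by
  rw [pvReplicate_prefix_iff] at h
  by_cases hcx : c = x
  · subst hcx
    simp only [List.takeWhile_cons, beq_self_eq_true, if_true, List.length_cons] at h
    exact ⟨rfl, by omega⟩
  · rw [List.takeWhile_cons] at h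
    simp [hcx] at h

theorem pvRun_head_prefix {c : Char} {l : List Char}
    (h : 4 ≤ 1 + (l.takeWhile (fun d => d == c)).length) :
    List.replicate 4 c <+: c :: l := by
  rw [pvReplicate_prefix_iff]
  simp only [List.takeWhile_cons, beq_self_eq_true, if_true, List.length_cons]
  omega

theorem pvGood_cons (c : Char) (l : List Char) :
    pvGood (c :: l) ↔
      (pvDNA.contains c = true ∧ 4 ≤ 1 + (l.takeWhile (fun d => d == c)).length) ∨ pvGood l := by
  constructor
  · rintro (h | h | h | h) <;> rw [List.infix_cons_iff] at h <;> rcases h with h | h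
    · rcases pvRun_head (x := 'A') h with ⟨hc, hr⟩
      exact Or.inl ⟨by rw [hc]; decide, hr⟩
    · exact Or.inr (Or.inl h)
    · rcases pvRun_head (x := 'T') h with ⟨hc, hr⟩
      exact Or.inl ⟨by rw [hc]; decide, hr⟩
    · exact Or.inr (Or.inr (Or.inl h))
    · rcases pvRun_head (x := 'C') h with ⟨hc, hr⟩
      exact Or.inl ⟨by rw [hc]; decide, hr⟩
    · exact Or.inr (Or.inr (Or.inr (Or.inl h)))
    · rcases pvRun_head (x := 'G') h with ⟨hc, hr⟩
      exact Or.inl ⟨by rw [hc]; decide, hr⟩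
    · exact Or.inr (Or.inr (Or.inr (Or.inr h)))
  · rintro (⟨hm, hr⟩ | h)
    · have hpre : List.replicate 4 c <+: c :: l := pvRun_head_prefix hr
      have hc : c = 'A' ∨ c = 'T' ∨ c = 'C' ∨ c = 'G' := by
        simp [pvDNA] at hm
        tauto
      rcases hc with h | h | h | h <;> subst h
      · exact Or.inl (List.infix_cons_iff.mpr (Or.inl hpre))
      · exact Or.inr (Or.inl (List.infix_cons_iff.mpr (Or.inl hpre)))
      · exact Or.inr (Or.inr (Or.inl (List.infix_cons_iff.mpr (Or.inl hpre))))
      · exact Or.inr (Or.inr (Or.inr (List.infix_cons_iff.mpr (Or.inl hpre))))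
    · rcases h with h | h | h | h
      · exact Or.inl (List.infix_cons_iff.mpr (Or.inr h))
      · exact Or.inr (Or.inl (List.infix_cons_iff.mpr (Or.inr h)))
      · exact Or.inr (Or.inr (Or.inl (List.infix_cons_iff.mpr (Or.inr h))))
      · exact Or.inr (Or.inr (Or.inr (List.infix_cons_iff.mpr (Or.inr h))))

theorem pvScanChars_cons_self (c : Char) (l : List Char) (k : Nat) :
    pvScanChars (c :: l) (some c) k =
      if 4 ≤ k + 1 ∧ pvDNA.contains c = true then true
      else pvScanChars l (some c) (k + 1) := by
  simp only [pvScanChars, beq_self_eq_true, if_true]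
  by_cases hb : 4 ≤ k + 1 <;> cases hd : pvDNA.contains c <;>
    simp [hb]

theorem pvScanChars_cons_ne (c : Char) (p : Char) (l : List Char) (k : Nat)
    (hc : ¬ c = p) :
    pvScanChars (c :: l) (some p) k = pvScanChars l (some c) 1 := by
  simp [pvScanChars, show ¬ p = c from fun h => hc h.symm]

theorem pvScanChars_some_iff (l : List Char) :
    ∀ (p : Char) (k : Nat), 1 ≤ k →
      (pvScanChars l (some p) k = true ↔
        (pvDNA.contains p = true ∧ 1 ≤ (l.takeWhile (fun d => d == p)).length ∧
          4 ≤ k + (l.takeWhile (fun d => d == p)).length) ∨ pvGood l) := by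
  induction l with
  | nil =>
    intro p k _
    simp [pvScanChars]
    exact fun h => (pvGood_nil h).elim
  | cons c l ih =>
    intro p k hk
    by_cases hc : c = p
    · subst hc
      rw [pvScanChars_cons_self]
      simp only [List.takeWhile_cons, beq_self_eq_true, if_true, List.length_cons, pvGood_cons]
      by_cases hret : 4 ≤ k + 1 ∧ pvDNA.contains c = true
      · rw [if_pos hret]
        constructor
        · intro _
          exact Or.inl ⟨hret.2, by omega⟩
        · intro _; rfl
      · rw [if_neg hret, ih c (k + 1) (by omega)]
        by_cases hd : pvDNA.contains c = true
        · have hk3 : ¬ (4 ≤ k + 1) := fun h => hret ⟨h, hd⟩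
          constructor
          · rintro (⟨_, _, h2⟩ | h)
            · exact Or.inl ⟨hd, by omega⟩
            · exact Or.inr (Or.inr h)
          · rintro (⟨_, h2⟩ | ⟨_, h2⟩ | h)
            · exact Or.inl ⟨hd, by omega, by omega⟩
            · exact Or.inl ⟨hd, by omega, by omega⟩
            · exact Or.inr h
        · constructor
          · rintro (⟨h1, _⟩ | h)
            · exact absurd h1 hd
            · exact Or.inr (Or.inr h)
          · rintro (⟨h1, _⟩ | ⟨h1, _⟩ | h)
            · exact absurd h1 hd
            · exact absurd h1 hd
            · exact Or.inr h
    · rw [pvScanChars_cons_ne c p l k hc, ih c 1 (by omega)]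
      have htw : (c :: l).takeWhile (fun d => d == p) = [] := by
        simp [hc]
      rw [htw, pvGood_cons]
      constructor
      · rintro (⟨h1, h2, h3⟩ | h)
        · exact Or.inr (Or.inl ⟨h1, by omega⟩)
        · exact Or.inr (Or.inr h)
      · rintro (⟨_, h2, _⟩ | ⟨h1, h2⟩ | h)
        · simp at h2
        · exact Or.inl ⟨h1, by omega, by omega⟩
        · exact Or.inr h

theorem pvScanChars_none_iff (l : List Char) :
    pvScanChars l none 0 = true ↔ pvGood l := by
  cases l with
  | nil =>
    simp [pvScanChars]
    exact fun h => (pvGood_nil h).elim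
  | cons c l =>
    have hstep : pvScanChars (c :: l) none 0 = pvScanChars l (some c) 1 := by
      simp [pvScanChars]
    rw [hstep, pvScanChars_some_iff l c 1 (by omega), pvGood_cons]
    constructor
    · rintro (⟨h1, h2, h3⟩ | h)
      · exact Or.inl ⟨h1, by omega⟩
      · exact Or.inr h
    · rintro (⟨h1, h2⟩ | h)
      · exact Or.inl ⟨h1, by omega, by omega⟩
      · exact Or.inr h

theorem pvFind_or_iff (row : List Char) :
    ((PySem.Chars.find row pvCOMPA != -1) || (PySem.Chars.find row pvCOMPT != -1) ||
      (PySem.Chars.find row pvCOMPC != -1) || (PySem.Chars.find row pvCOMPG != -1)) = true ↔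
      pvGood row := by
  simp only [Bool.or_eq_true, bne_iff_ne]
  rw [PySem.Chars.find_ne_neg_one_iff, PySem.Chars.find_ne_neg_one_iff,
    PySem.Chars.find_ne_neg_one_iff, PySem.Chars.find_ne_neg_one_iff]
  unfold pvGood pvCOMPA pvCOMPT pvCOMPC pvCOMPG
  tauto

-- ===== VERDICT (by name: the statement is the Claim_ definition above) =====
theorem es_vertical_spec : Claim_equal_es_vertical := by
  intro dna _ _
  unfold Spec_es_vertical es_vertical es_vertical_alt
  apply PySem.List.any_congr_mem
  intro j _
  rw [pvScan_eq_scanChars]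
  rw [PySem.List.foldl_append_singleton_eq_map (fun x => pvAt dna x j) (List.range dna.length) []]
  simp only [List.nil_append]
  apply Bool.coe_iff_coe.mp
  rw [pvFind_or_iff, pvScanChars_none_iff]
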